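-- pv_equiv track=rewrite | github.com/KirilMT/Troubleshooting-Wizard | src/search_optimizer.py | optimize_database_query
-- ===== SOURCE A (Python) =====
-- from typing import List, Dict, Any, Optional, Tuple
--
-- def optimize_database_query(conditions: List[str], params: List[str]) -> Tuple[str, List[str]]:
--     """Optimize database query by reordering conditions for better performance."""
--     if not conditions:
--         return "", []
--
--     # Reorder conditions: exact matches first, then LIKE patterns
--     exact_conditions = []
--     like_conditions = []
--     exact_params = []
--     like_params = []
--
--     for i, condition in enumerate(conditions):
--         if "LIKE" in condition:
--             like_conditions.append(condition)
--             like_params.append(params[i])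
--         else:
--             exact_conditions.append(condition)
--             exact_params.append(params[i])
--
--     # Combine: exact matches first for better index usage
--     optimized_conditions = exact_conditions + like_conditions
--     optimized_params = exact_params + like_params
--
--     return " AND ".join(optimized_conditions), optimized_params
-- ===== SOURCE B (Python) =====
-- def optimize_database_query(conditions, params):
--     """Optimize database query by reordering conditions for better performance."""
--     if not conditions:
--         return "", []
--     # stable sort of positions: exact conditions (key False) before LIKE ones (key True)
--     order = sorted(range(len(conditions)), key=lambda i: "LIKE" in conditions[i])
--     return " AND ".join(conditions[i] for i in order), [params[i] for i in order]
-- ===== Notes on version B (the rewrite author's own statement) =====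
-- stated objective: idiomatic
-- what changed: Replaces the four-list two-bucket partition loop with a single stable sort of the positions keyed on whether the condition contains 'LIKE', then builds both outputs by indexing through that order.
import Mathlib
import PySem

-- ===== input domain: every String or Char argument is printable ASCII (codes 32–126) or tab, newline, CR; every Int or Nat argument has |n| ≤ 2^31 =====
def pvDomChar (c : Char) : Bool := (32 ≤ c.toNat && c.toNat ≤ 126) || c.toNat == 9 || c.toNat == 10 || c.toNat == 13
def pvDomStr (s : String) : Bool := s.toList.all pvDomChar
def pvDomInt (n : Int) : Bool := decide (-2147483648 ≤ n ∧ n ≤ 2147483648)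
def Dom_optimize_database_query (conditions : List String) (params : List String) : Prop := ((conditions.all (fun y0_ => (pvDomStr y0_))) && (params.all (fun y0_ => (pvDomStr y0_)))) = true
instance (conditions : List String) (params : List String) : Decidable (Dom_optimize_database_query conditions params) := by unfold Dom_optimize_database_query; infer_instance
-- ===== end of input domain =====

-- ===== PORT A =====
-- Port of A: two-bucket partition over enumerate(conditions), then concatenate and join.
-- Pre_ excludes the inputs where Python A raises IndexError (params shorter than conditions),
-- so pyGetD's default is never the value actually claimed about.
def optimize_database_query (conditions : List String) (params : List String) : String × List String :=
  if conditions = [] then ("", [])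
  else
    let st := (PySem.List.enumerate conditions 0).foldl
      (fun (acc : List String × List String × List String × List String) p =>
        if PySem.Str.isIn "LIKE" p.2 then
          (acc.1, acc.2.1 ++ [p.2], acc.2.2.1, acc.2.2.2 ++ [PySem.List.pyGetD params p.1 ""])
        else
          (acc.1 ++ [p.2], acc.2.1, acc.2.2.1 ++ [PySem.List.pyGetD params p.1 ""], acc.2.2.2))
      ([], [], [], [])
    (PySem.Str.join " AND " (st.1 ++ st.2.1), st.2.2.1 ++ st.2.2.2)

-- ===== PORT B =====
-- Port of B: stable sort of the index range by the Boolean key "LIKE" in conditions[i],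
-- then both outputs are built by indexing through that order.
def optimize_database_query_alt (conditions : List String) (params : List String) : String × List String :=
  if conditions = [] then ("", [])
  else
    let order := PySem.List.sorted (PySem.List.pyRange 0 conditions.length 1)
      (fun i => PySem.Str.isIn "LIKE" (PySem.List.pyGetD conditions i ""))
    (PySem.Str.join " AND " (order.map (fun i => PySem.List.pyGetD conditions i "")),
     order.map (fun i => PySem.List.pyGetD params i ""))

-- ===== PRECONDITION & SPEC =====
-- Pre_ excludes exactly the inputs where Python A raises IndexError (params[i] with
-- len(params) < len(conditions)); Python B raises there too.
def Pre_optimize_database_query (conditions : List String) (params : List String) : Prop :=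
  conditions.length ≤ params.length
instance (conditions : List String) (params : List String) : Decidable (Pre_optimize_database_query conditions params) := by unfold Pre_optimize_database_query; infer_instance
def pvWitness_optimize_database_query : List String × List String :=
  (["a = ?", "b LIKE ?", "c = ?"], ["1", "%x%", "2"])

def Spec_optimize_database_query (conditions : List String) (params : List String) (out : String × List String) : Prop := out = optimize_database_query_alt conditions params
instance (conditions : List String) (params : List String) (out : String × List String) : Decidable (Spec_optimize_database_query conditions params out) := by unfold Spec_optimize_database_query; infer_instance

-- ===== CLAIM (what is proved, stated in full; the proofs are below) =====
def Claim_equal_optimize_database_query : Prop := ∀ (conditions : List String) (params : List String), Dom_optimize_database_query conditions params → Pre_optimize_database_query conditions params → Spec_optimize_database_query conditions params (optimize_database_query conditions params)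

-- ===== LEMMAS AND PROOFS =====

-- Inserting past a prefix in which `before x` never holds.
theorem insertBy_append_not_before {α : Type} (before : α → α → Bool) (x : α) (F T : List α)
    (hF : ∀ y ∈ F, before x y = false) :
    PySem.List.insertBy before x (F ++ T) = F ++ PySem.List.insertBy before x T := by
  induction F with
  | nil => rfl
  | cons a F ih =>
    simp only [List.cons_append, PySem.List.insertBy, hF a (by simp)]
    simp [ih (fun y hy => hF y (by simp [hy]))]

-- Stable insertion sort with a Boolean key partitions: false-keyed elements first, in order.
theorem foldl_insertBy_bool {α : Type} (K : α → Bool) (xs F T : List α)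
    (hF : ∀ a ∈ F, K a = false) (hT : ∀ a ∈ T, K a = true) :
    xs.foldl (fun acc x => PySem.List.insertBy (fun a b => decide (K a < K b)) x acc) (F ++ T)
      = (F ++ xs.filter (fun x => !K x)) ++ (T ++ xs.filter K) := by
  induction xs generalizing F T with
  | nil => simp
  | cons x xs ih =>
    simp only [List.foldl_cons]
    by_cases hx : K x = true
    · have h1 : PySem.List.insertBy (fun a b => decide (K a < K b)) x (F ++ T) = (F ++ T) ++ [x] := by
        apply PySem.List.insertBy_of_forall_not_before
        intro y _; simp [hx]
      rw [h1, List.append_assoc, ih F (T ++ [x]) hF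
        (fun a ha => by rcases List.mem_append.mp ha with h | h; exact hT a h; simp_all)]
      simp [hx]
    · have hx' : K x = false := by simp_all
      have h1 : PySem.List.insertBy (fun a b => decide (K a < K b)) x (F ++ T) = (F ++ [x]) ++ T := by
        rw [insertBy_append_not_before _ _ _ _ (fun y hy => by simp [hx', hF y hy])]
        cases T with
        | nil => simp [PySem.List.insertBy]
        | cons t ts =>
          simp only [PySem.List.insertBy, hT t (by simp), hx']
          simp
      rw [h1, ih (F ++ [x]) T
        (fun a ha => by rcases List.mem_append.mp ha with h | h; exact hF a h; simp_all) hT]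
      simp [hx']

theorem sorted_bool_key {α : Type} (xs : List α) (K : α → Bool) :
    PySem.List.sorted xs K false = xs.filter (fun x => !K x) ++ xs.filter K := by
  have := foldl_insertBy_bool K xs [] [] (by simp) (by simp)
  simpa [PySem.List.sorted_eq_foldl_insertBy] using this

-- A's partition loop, characterised by filters of the enumerated pairs.
theorem fold_partition (params : List String) (L : List (Int × String))
    (ec lc ep lp : List String) :
    L.foldl
      (fun (acc : List String × List String × List String × List String) p =>
        if PySem.Str.isIn "LIKE" p.2 then
          (acc.1, acc.2.1 ++ [p.2], acc.2.2.1, acc.2.2.2 ++ [PySem.List.pyGetD params p.1 ""])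
        else
          (acc.1 ++ [p.2], acc.2.1, acc.2.2.1 ++ [PySem.List.pyGetD params p.1 ""], acc.2.2.2))
      (ec, lc, ep, lp)
    = (ec ++ (L.filter (fun p => !PySem.Str.isIn "LIKE" p.2)).map (·.2),
       lc ++ (L.filter (fun p => PySem.Str.isIn "LIKE" p.2)).map (·.2),
       ep ++ (L.filter (fun p => !PySem.Str.isIn "LIKE" p.2)).map (fun p => PySem.List.pyGetD params p.1 ""),
       lp ++ (L.filter (fun p => PySem.Str.isIn "LIKE" p.2)).map (fun p => PySem.List.pyGetD params p.1 "")) := by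
  induction L generalizing ec lc ep lp with
  | nil => simp
  | cons p L ih =>
    simp only [List.foldl_cons]
    by_cases hp : PySem.Str.isIn "LIKE" p.2 = true
    · rw [if_pos hp, ih]
      have hp' : PySem.Chars.isIn ['L','I','K','E'] p.2.toList = true := by simpa using hp
      simp [hp']
    · rw [if_neg hp, ih]
      have hp' : PySem.Chars.isIn ['L','I','K','E'] p.2.toList = false := by simpa using hp
      simp [hp']

-- ===== VERDICT (by name: the statement is the Claim_ definition above) =====
theorem optimize_database_query_spec : Claim_equal_optimize_database_query := by
  intro conditions params _ _
  unfold Spec_optimize_database_query optimize_database_query optimize_database_query_alt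
  by_cases hc : conditions = []
  · simp [hc]
  · rw [if_neg hc, if_neg hc]
    have hE := PySem.List.enumerate_eq_map_pyRange conditions ""
    rw [hE, fold_partition, sorted_bool_key]
    simp [List.filter_map, List.map_map, Function.comp_def]
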